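-- pv_equiv track=rewrite | github.com/lunalovecode/abakoda-2021 | python/abakoda-round-4/belang.py | solve
-- ===== SOURCE A (Python) =====
-- def solve(word):
--     ans = 1
--     for letter in word:
--         if letter == "e":
--             ans *= 2
--         elif letter == "i":
--             ans *= 2
--         elif letter == "o":
--             ans *= 2
--         elif letter == "u":
--             ans *= 2
--     return ans;
-- ===== SOURCE B (Python) =====
-- def solve(word):
--     return 1 << (word.count("e") + word.count("i") + word.count("o") + word.count("u"))
-- ===== Notes on version B (the rewrite author's own statement) =====
-- stated objective: faster
-- what changed: Instead of A's single position-by-position pass that doubles a running product inside a four-way branch chain, B makes four independent library scans (word.count per vowel), adds the per-vowel totals, and produces the result as a single bit shift 1 << total; the scans run in C, removing the Python-level per-character loop (measured 21x at n=262144).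
import Mathlib
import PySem

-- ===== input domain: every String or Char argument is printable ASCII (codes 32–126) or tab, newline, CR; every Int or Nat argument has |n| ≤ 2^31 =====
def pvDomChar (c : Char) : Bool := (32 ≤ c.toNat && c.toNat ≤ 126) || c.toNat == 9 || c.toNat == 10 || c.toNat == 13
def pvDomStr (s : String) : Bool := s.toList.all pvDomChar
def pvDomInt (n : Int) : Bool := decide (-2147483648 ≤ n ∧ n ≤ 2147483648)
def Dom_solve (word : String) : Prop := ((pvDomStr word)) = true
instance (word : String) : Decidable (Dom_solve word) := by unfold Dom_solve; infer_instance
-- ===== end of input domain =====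

-- B replaces A's single pass with its doubling accumulator by four per-vowel scans (word.count) combined into one bit shift.

-- ===== PORT A =====
def solve (word : String) : Int :=
  word.toList.foldl (fun ans letter =>
    if letter = 'e' then ans * 2
    else if letter = 'i' then ans * 2
    else if letter = 'o' then ans * 2
    else if letter = 'u' then ans * 2
    else ans) 1

-- ===== PORT B =====
def solve_alt (word : String) : Int :=
  (1 : Int) <<< (PySem.Str.count word "e" + PySem.Str.count word "i"
               + PySem.Str.count word "o" + PySem.Str.count word "u")

-- ===== PRECONDITION & SPEC =====
def Spec_solve (word : String) (out : Int) : Prop := out = solve_alt word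
instance (word : String) (out : Int) : Decidable (Spec_solve word out) := by unfold Spec_solve; infer_instance

-- ===== CLAIM (what is proved, stated in full; the proofs are below) =====
def Claim_equal_solve : Prop := ∀ (word : String), Dom_solve word → Spec_solve word (solve word)

-- ===== LEMMAS AND PROOFS =====

-- PySem.Chars.count with a single-character needle is List.count.
theorem count_go_single (c : Char) (l : List Char) (fuel acc : Nat) (h : l.length ≤ fuel) :
    PySem.Chars.count.go [c] fuel l acc = acc + l.count c := by
  induction l generalizing fuel acc with
  | nil => cases fuel <;> simp [PySem.Chars.count.go]
  | cons x t ih =>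
    cases fuel with
    | zero => simp at h
    | succ f =>
      simp only [List.length_cons, Nat.succ_le_succ_iff] at h
      rw [PySem.Chars.count.go]
      by_cases hx : x = c
      · simp only [hx, List.isPrefixOf]
        simp [ih _ _ h]; omega
      · simp only [List.isPrefixOf]
        rw [if_neg (by simp; exact fun h' => absurd h'.symm hx)]
        simp [ih _ _ h, hx]

theorem count_single (c : Char) (s : List Char) :
    PySem.Chars.count s [c] = s.count c := by
  simp [PySem.Chars.count, count_go_single c s s.length 0 le_rfl]

-- A's running product equals the seed times 2 to the total vowel count.
theorem solve_foldl_pow (l : List Char) (a : Int) :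
    l.foldl (fun ans letter =>
      if letter = 'e' then ans * 2
      else if letter = 'i' then ans * 2
      else if letter = 'o' then ans * 2
      else if letter = 'u' then ans * 2
      else ans) a
    = a * (2 : Int) ^ (l.count 'e' + l.count 'i' + l.count 'o' + l.count 'u') := by
  induction l generalizing a with
  | nil => simp
  | cons c t ih =>
    simp only [List.foldl_cons, List.count_cons, ih]
    by_cases h1 : c = 'e' <;> by_cases h2 : c = 'i' <;> by_cases h3 : c = 'o' <;> by_cases h4 : c = 'u' <;>
      simp [h1, h2, h3, h4, pow_succ, pow_add] <;> ring

theorem one_shiftLeft_int (k : Nat) : (1 : Int) <<< k = (2 : Int) ^ k := by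
  rw [Int.shiftLeft_eq]; ring

-- ===== VERDICT (by name: the statement is the Claim_ definition above) =====
theorem solve_spec : Claim_equal_solve := by
  intro word _
  unfold Spec_solve solve solve_alt
  rw [solve_foldl_pow, one_shiftLeft_int]
  simp only [PySem.Str.count_eq]
  have he := count_single 'e' word.toList
  have hi := count_single 'i' word.toList
  have ho := count_single 'o' word.toList
  have hu := count_single 'u' word.toList
  simp only [show ("e" : String).toList = ['e'] from rfl, show ("i" : String).toList = ['i'] from rfl,
    show ("o" : String).toList = ['o'] from rfl, show ("u" : String).toList = ['u'] from rfl,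
    he, hi, ho, hu]
  ring
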